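-- pv_equiv track=rewrite | github.com/YashTayal04/DSA-Questions | Greedy Algorithms/theShipCompany.py | solve
-- ===== SOURCE A (Python) =====
-- def solve(A, B, C):
--     C.sort()
--     mi=0
--     temp=A
--     for i in C:
--         if i<=temp:
--             mi+=(i*(i+1)//2)
--             temp-=i
--         else:
--             mi+=(i*(i+1)//2)
--             i-=temp
--             mi-=(i*(i+1)//2)
--             break
--     ma=0
--     for i in range(A):
--         for j in range(B-1,-1,-1):
--             if j==0:
--                 ma+=C[j]
--                 C[j]-=1
--                 break
--             elif C[j]>C[j-1]:
--                 ma+=C[j]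
--                 C[j]-=1
--                 break
--     return [ma,mi]
-- ===== SOURCE B (Python) =====
-- # Different algorithm: the max cost is computed by a binary-search "leveling" threshold
-- # over the docks (O(B log V)) instead of A's per-ship rescans (O(A*B)); the min cost is a
-- # prefix-cut plus triangular-number sums. Return-value equivalence only: A also mutates C
-- # (sorts it in place and decrements entries); B only sorts it in place.
-- def solve(A, B, C):
--     C.sort()
--     # ---- min: take docks in ascending order; find the dock where the ships run out ----
--     pref = 0
--     cut = len(C)
--     for k, c in enumerate(C):
--         if pref + c > A:
--             cut = k
--             break
--         pref += c
--     mi = sum(c * (c + 1) // 2 for c in C[:cut])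
--     if cut < len(C):
--         c = C[cut]
--         rem = c - (A - pref)
--         mi += c * (c + 1) // 2 - rem * (rem + 1) // 2
--     # ---- max: each ship pays the current maximum capacity among the first B docks;
--     # the values paid are the A largest of the chains {c, c-1, c-2, ...}.  Find the
--     # level t after A removals by binary search, then sum the removed values. ----
--     ma = 0
--     if A > 0 and B > 0 and C:
--         docks = C[:B]
--         lo = min(docks) - A - 1          # strictly below the final level
--         hi = max(docks)                  # nothing is above this level
--         while lo < hi:                   # least t with (number of values > t) <= A
--             mid = lo + (hi - lo) // 2
--             if sum(c - mid for c in docks if c > mid) <= A: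
--                 hi = mid
--             else:
--                 lo = mid + 1
--         t = hi
--         above = sum(c - t for c in docks if c > t)
--         ma = sum(c * (c + 1) // 2 - t * (t + 1) // 2 for c in docks if c > t) + (A - above) * t
--     return [ma, mi]
-- ===== Notes on version B (the rewrite author's own statement) =====
-- stated objective: faster
-- what changed: The max cost is computed by binary-searching the leveling threshold of the docks' capacity chains and summing triangular numbers (O(B log V)) instead of A's per-ship rescans of the dock list (O(A*B)); the min cost is computed by locating the cut dock once and summing closed forms over the prefix.
import Mathlib
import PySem

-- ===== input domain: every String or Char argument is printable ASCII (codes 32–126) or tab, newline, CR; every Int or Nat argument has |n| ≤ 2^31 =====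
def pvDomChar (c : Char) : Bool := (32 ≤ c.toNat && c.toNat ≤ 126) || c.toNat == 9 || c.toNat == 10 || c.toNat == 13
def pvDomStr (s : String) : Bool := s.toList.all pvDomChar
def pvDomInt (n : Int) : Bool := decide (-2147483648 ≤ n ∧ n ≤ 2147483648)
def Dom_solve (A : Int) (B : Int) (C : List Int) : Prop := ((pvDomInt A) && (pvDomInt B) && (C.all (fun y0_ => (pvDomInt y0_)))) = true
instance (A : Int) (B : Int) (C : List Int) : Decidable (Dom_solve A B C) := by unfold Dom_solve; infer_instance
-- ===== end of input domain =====

-- B computes the max cost by a binary-searched leveling threshold (and the min cost by a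
-- prefix cut with closed-form sums) instead of A's per-ship rescans; proved to return A's
-- exact value on every input where A returns (Pre_: no IndexError). Return-value equivalence
-- only: Python A also mutates C in place (sort + decrements), Python B only sorts it.


-- ===== PORT A =====
-- 'for i in C: …' computing mi with its break; state (mi, temp)
def solveMin : List Int → Int → Int → Int
  | [], mi, _ => mi
  | i :: rest, mi, temp =>
    if i ≤ temp then
      solveMin rest (mi + PySem.Int.floordiv (i * (i + 1)) 2) (temp - i)
    else
      mi + PySem.Int.floordiv (i * (i + 1)) 2
         - PySem.Int.floordiv ((i - temp) * ((i - temp) + 1)) 2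

-- the inner 'for j in range(B-1,-1,-1)' scan with its break; returns the value added to ma
-- and the updated list; none where Python raises IndexError
def solveInner : List Int → List Int → Option (Int × List Int)
  | [], C => some (0, C)
  | j :: js, C =>
    if j = 0 then
      match PySem.List.pyGet? C 0 with
      | some v => some (v, PySem.List.pySetD C 0 (v - 1))
      | none => none
    else
      match PySem.List.pyGet? C j, PySem.List.pyGet? C (j - 1) with
      | some vj, some vj1 =>
        if vj1 < vj then some (vj, PySem.List.pySetD C j (vj - 1))
        else solveInner js C
      | _, _ => none

-- 'for i in range(A)' accumulating ma; fuel = number of remaining iterations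
def solveOuter (B : Int) : Nat → Int → List Int → Option (Int × List Int)
  | 0, ma, C => some (ma, C)
  | n + 1, ma, C =>
    match solveInner (PySem.List.pyRange (B - 1) (-1) (-1)) C with
    | some (d, C') => solveOuter B n (ma + d) C'
    | none => none

def solve (A : Int) (B : Int) (C : List Int) : List Int :=
  let Cs := PySem.List.sorted C (fun x => x) false
  let mi := solveMin Cs 0 A
  match solveOuter B A.toNat 0 Cs with
  | some (ma, _) => [ma, mi]
  | none => []   -- unreachable under Pre_solve (Python raises IndexError there)

-- ===== PORT B =====
def altTri (c : Int) : Int := PySem.Int.floordiv (c * (c + 1)) 2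

-- the 'for k, c in enumerate(C)' loop locating the cut: returns (pref, cut)
def altFindCut (A : Int) : List Int → Int → Nat → Int × Nat
  | [], pref, k => (pref, k)
  | c :: rest, pref, k =>
    if A < pref + c then (pref, k) else altFindCut A rest (pref + c) (k + 1)

def altMi (A : Int) (Cs : List Int) : Int :=
  let pc := altFindCut A Cs 0 0
  let base := ((PySem.List.slice Cs none (some (pc.2 : Int))).map altTri).sum
  if (pc.2 : Int) < (Cs.length : Int) then
    -- C[cut]: the branch guard guarantees the index is in range
    let c := PySem.List.pyGetD Cs (pc.2 : Int) 0
    let rem := c - (A - pc.1)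
    base + (altTri c - altTri rem)
  else base

-- number of chain values above level t: sum(c - t for c in docks if c > t)
def altG (docks : List Int) (t : Int) : Int :=
  ((docks.filter (fun c => t < c)).map (fun c => c - t)).sum

-- 'while lo < hi: …' binary search for the least t with altG docks t ≤ n;
-- fuel = hi - lo bounds the number of iterations (the interval shrinks by ≥ 1 each turn)
def altSearch (docks : List Int) (n : Int) : Nat → Int → Int → Int
  | 0, lo, _ => lo
  | fuel + 1, lo, hi =>
    if lo < hi then
      let mid := lo + PySem.Int.floordiv (hi - lo) 2
      if altG docks mid ≤ n then altSearch docks n fuel lo mid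
      else altSearch docks n fuel (mid + 1) hi
    else lo

def solve_alt (A : Int) (B : Int) (C : List Int) : List Int :=
  let Cs := PySem.List.sorted C (fun x => x) false
  let mi := altMi A Cs
  let ma :=
    if 0 < A ∧ 0 < B ∧ Cs ≠ [] then
      let docks := PySem.List.slice Cs none (some B)
      -- min(docks)/max(docks): docks is nonempty in this branch, so min?/max? are some
      match PySem.List.min? docks (fun x => x), PySem.List.max? docks (fun x => x) with
      | some mn, some mx =>
        let lo := mn - A - 1
        let t := altSearch docks A (mx - lo).toNat lo mx
        let above := altG docks t
        ((docks.filter (fun c => t < c)).map (fun c => altTri c - altTri t)).sum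
          + (A - above) * t
      | _, _ => 0   -- unreachable: docks ≠ []
    else 0
  [ma, mi]

-- ===== PRECONDITION & SPEC =====
-- Pre_solve excludes exactly the inputs on which Python A raises IndexError
-- (the max loop runs, i.e. 0 < A, while some scanned index B-1, …, 0 is out of range).
def Pre_solve (A : Int) (B : Int) (C : List Int) : Prop := 0 < A → B ≤ (C.length : Int)
instance (A : Int) (B : Int) (C : List Int) : Decidable (Pre_solve A B C) := by
  unfold Pre_solve; infer_instance

def pvWitness_solve : Int × Int × List Int := (4, 3, [2, 1, 3])

def Spec_solve (A : Int) (B : Int) (C : List Int) (out : List Int) : Prop := out = solve_alt A B C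
instance (A : Int) (B : Int) (C : List Int) (out : List Int) : Decidable (Spec_solve A B C out) := by unfold Spec_solve; infer_instance

-- ===== CLAIM (what is proved, stated in full; the proofs are below) =====
def Claim_equal_solve : Prop := ∀ (A : Int) (B : Int) (C : List Int), Dom_solve A B C → Pre_solve A B C → Spec_solve A B C (solve A B C)

-- ===== LEMMAS AND PROOFS =====

-- ---------- part 1: the min cost ----------

-- reference form of A's min loop (accumulator removed)
def miRef : List Int → Int → Int
  | [], _ => 0
  | c :: rest, temp =>
    if c ≤ temp then altTri c + miRef rest (temp - c)
    else altTri c - altTri (c - temp)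

lemma solveMin_eq_miRef (L : List Int) : ∀ (acc temp : Int),
    solveMin L acc temp = acc + miRef L temp := by
  induction L with
  | nil => intro acc temp; simp [solveMin, miRef]
  | cons c rest ih =>
    intro acc temp
    simp only [solveMin, miRef, altTri]
    split_ifs with h
    · rw [ih]; ring
    · ring

lemma altFindCut_shift (A : Int) (L : List Int) : ∀ (pref : Int) (k : Nat),
    altFindCut A L pref k
      = ((altFindCut A L pref 0).1, k + (altFindCut A L pref 0).2) := by
  induction L with
  | nil => intro pref k; simp [altFindCut]
  | cons c rest ih =>
    intro pref k
    simp only [altFindCut]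
    split_ifs with h
    · simp
    · rw [ih (pref + c) (k + 1), ih (pref + c) 1]
      simp
      omega

-- relative form of B's min computation
def miAlt (A : Int) (L : List Int) (pref : Int) : Int :=
  let pc := altFindCut A L pref 0
  ((L.take pc.2).map altTri).sum +
    (if pc.2 < L.length then
      altTri (L.getD pc.2 0) - altTri (L.getD pc.2 0 - (A - pc.1)) else 0)

lemma miAlt_eq_miRef (A : Int) (L : List Int) : ∀ (pref : Int),
    miAlt A L pref = miRef L (A - pref) := by
  induction L with
  | nil => intro pref; simp [miAlt, altFindCut, miRef]
  | cons c rest ih =>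
    intro pref
    by_cases h : A < pref + c
    · have hc : ¬ c ≤ A - pref := by omega
      simp [miAlt, altFindCut, if_pos h, miRef, hc]
    · have hc : c ≤ A - pref := by omega
      have hsh := altFindCut_shift A rest (pref + c) 1
      simp only [miAlt, altFindCut, if_neg h, zero_add, hsh, miRef, if_pos hc]
      set pc := altFindCut A rest (pref + c) 0 with hpc
      have hlen : (1 + pc.2 < (c :: rest).length) ↔ (pc.2 < rest.length) := by
        simp [List.length_cons]; omega
      have htake : (c :: rest).take (1 + pc.2) = c :: rest.take pc.2 := by
        rw [Nat.add_comm]; simp [List.take_succ_cons]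
      have hgetD : (c :: rest).getD (1 + pc.2) 0 = rest.getD pc.2 0 := by
        rw [Nat.add_comm]; simp
      rw [htake]
      have ihr := ih (pref + c)
      simp only [miAlt, ← hpc] at ihr
      have harith : A - (pref + c) = A - pref - c := by ring
      rw [harith] at ihr
      simp only [List.map_cons, List.sum_cons, hgetD]
      rw [if_congr hlen rfl rfl]
      rw [← ihr]
      ring

lemma altMi_eq_miAlt (A : Int) (Cs : List Int) : altMi A Cs = miAlt A Cs 0 := by
  unfold altMi miAlt
  have hg : ∀ k : Nat, PySem.List.pyGetD Cs ((k : Nat) : Int) 0 = Cs.getD k 0 := by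
    intro k; simp [pysem, List.getD]
  simp only [PySem.List.slice_to_natCast, Nat.cast_lt, hg]
  split_ifs with h
  · rfl
  · simp

lemma altMi_eq_solveMin (A : Int) (Cs : List Int) :
    altMi A Cs = solveMin Cs 0 A := by
  rw [altMi_eq_miAlt, miAlt_eq_miRef, solveMin_eq_miRef]
  simp

-- ---------- part 2: the max cost ----------

-- total chain mass above level t
def gS (docks : List Int) (t : Int) : Int :=
  (docks.map (fun c => max (c - t) 0)).sum

-- t is the level after n removals: least t with mass ≤ n
def IsTh (docks : List Int) (n t : Int) : Prop :=
  gS docks t ≤ n ∧ ∀ s < t, n < gS docks s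

def SumAbove (docks : List Int) (t : Int) : Int :=
  ((docks.filter (fun c => t < c)).map (fun c => altTri c - altTri t)).sum

-- the closed form for the max cost
def Fm (docks : List Int) (n t : Int) : Int :=
  SumAbove docks t + (n - gS docks t) * t

lemma altG_eq_gS (docks : List Int) (t : Int) : altG docks t = gS docks t := by
  induction docks with
  | nil => rfl
  | cons c rest ih =>
    simp only [altG, gS, List.filter_cons, List.map_cons, List.sum_cons] at *
    split_ifs with h <;> simp_all <;> omega

lemma gS_nonneg (docks : List Int) (t : Int) : 0 ≤ gS docks t := by
  induction docks with
  | nil => simp [gS]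
  | cons c rest ih => simp only [gS, List.map_cons, List.sum_cons] at *; omega

lemma gS_anti (docks : List Int) {s t : Int} (h : s ≤ t) : gS docks t ≤ gS docks s := by
  induction docks with
  | nil => simp [gS]
  | cons c rest ih => simp only [gS, List.map_cons, List.sum_cons] at *; omega

lemma gS_le_of_mem (docks : List Int) {c : Int} (h : c ∈ docks) (t : Int) :
    max (c - t) 0 ≤ gS docks t := by
  induction docks with
  | nil => simp at h
  | cons d rest ih =>
    simp only [gS, List.map_cons, List.sum_cons] at *
    rcases List.mem_cons.mp h with h | h
    · subst h; have := gS_nonneg rest t; simp [gS] at this ⊢; omega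
    · have := ih h; omega

lemma gS_eq_zero (docks : List Int) (t : Int) (h : ∀ c ∈ docks, c ≤ t) :
    gS docks t = 0 := by
  induction docks with
  | nil => simp [gS]
  | cons c rest ih =>
    simp only [gS, List.map_cons, List.sum_cons] at *
    have h1 := h c (by simp)
    have h2 : gS rest t = 0 := ih (fun c hc => h c (by simp [hc]))
    simp [gS] at h2; omega

lemma filter_above_nil (docks : List Int) (t : Int) (h : ∀ c ∈ docks, c ≤ t) :
    docks.filter (fun c => t < c) = [] := by
  rw [List.filter_eq_nil_iff]
  intro c hc; simpa using not_lt.mpr (h c hc)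

lemma all_le_of_gS_le_zero (docks : List Int) (t : Int) (h : gS docks t ≤ 0) :
    ∀ c ∈ docks, c ≤ t := by
  intro c hc
  have h1 := gS_le_of_mem docks hc t
  omega

lemma Fm_zero (docks : List Int) (t : Int) (h : gS docks t ≤ 0) : Fm docks 0 t = 0 := by
  have h0 : gS docks t = 0 := le_antisymm h (gS_nonneg docks t)
  have hall := all_le_of_gS_le_zero docks t h
  simp [Fm, SumAbove, filter_above_nil docks t hall, h0]

lemma tri_diff (m : Int) : altTri m - altTri (m - 1) = m := by
  obtain ⟨k, hk⟩ := Int.even_mul_succ_self m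
  obtain ⟨k', hk'⟩ := Int.even_mul_succ_self (m - 1)
  have e1 : altTri m = k := by
    simp only [altTri]
    rw [PySem.Int.floordiv_eq_ediv_of_pos (by omega)]
    omega
  have e2 : altTri (m - 1) = k' := by
    simp only [altTri]
    rw [PySem.Int.floordiv_eq_ediv_of_pos (by omega)]
    have : (m - 1) * (m - 1 + 1) = k' + k' := hk'
    omega
  have hm : m * (m + 1) = k + k := hk
  have hm' : (m - 1) * m = k' + k' := by have := hk'; ring_nf at this ⊢; omega
  nlinarith [hm, hm', e1, e2]

-- the search finds the threshold
lemma altSearch_spec (docks : List Int) (n : Int) :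
    ∀ (fuel : Nat) (lo hi : Int), (hi - lo).toNat ≤ fuel → lo ≤ hi →
      gS docks hi ≤ n → (∀ s < lo, n < gS docks s) →
      IsTh docks n (altSearch docks n fuel lo hi) := by
  intro fuel
  induction fuel with
  | zero =>
    intro lo hi hf hle hhi hlo
    have : lo = hi := by omega
    subst this
    exact ⟨by simpa [altSearch] using hhi, by simpa [altSearch] using hlo⟩
  | succ f ih =>
    intro lo hi hf hle hhi hlo
    by_cases h : lo < hi
    · have hd : PySem.Int.floordiv (hi - lo) 2 = (hi - lo) / 2 :=
        PySem.Int.floordiv_eq_ediv_of_pos (by omega)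
      simp only [altSearch, if_pos h]
      rw [altG_eq_gS]
      set mid := lo + PySem.Int.floordiv (hi - lo) 2 with hmid
      have hb : lo ≤ mid ∧ mid < hi := by rw [hmid, hd]; omega
      split_ifs with hg
      · exact ih lo mid (by omega) (by omega) hg hlo
      · refine ih (mid + 1) hi (by omega) (by omega) hhi ?_
        intro s hs
        by_cases h2 : s < lo
        · exact hlo s h2
        · exact lt_of_lt_of_le (not_le.mp hg) (gS_anti docks (by omega))
    · have : lo = hi := by omega
      subst this
      exact ⟨by simpa [altSearch] using hhi, by simpa [altSearch] using hlo⟩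

-- effect of one removal on the mass, the sums and the threshold
lemma gS_append_cons (l r : List Int) (x t : Int) :
    gS (l ++ x :: r) t = gS l t + max (x - t) 0 + gS r t := by
  simp [gS]; ring

lemma SumAbove_append_cons (l r : List Int) (x t : Int) :
    SumAbove (l ++ x :: r) t
      = SumAbove l t + (if t < x then altTri x - altTri t else 0) + SumAbove r t := by
  by_cases h : t < x
  · simp [SumAbove, List.filter_append, h]
    ring
  · simp [SumAbove, List.filter_append, h]

lemma step_gS_low (l r : List Int) (M t : Int) (ht : t ≤ M - 1) :
    gS (l ++ (M - 1) :: r) t = gS (l ++ M :: r) t - 1 := by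
  rw [gS_append_cons, gS_append_cons]
  omega

lemma step_gS_high (l r : List Int) (M t : Int) (ht : M ≤ t)
    (hub : ∀ c ∈ l ++ M :: r, c ≤ M) :
    gS (l ++ (M - 1) :: r) t = 0 ∧ gS (l ++ M :: r) t = 0 := by
  constructor
  · refine gS_eq_zero _ _ ?_
    intro c hc
    rcases List.mem_append.mp hc with h | h
    · exact le_trans (hub c (by simp [h])) ht
    · rcases List.mem_cons.mp h with h | h
      · omega
      · exact le_trans (hub c (by simp [h])) ht
  · exact gS_eq_zero _ _ (fun c hc => le_trans (hub c hc) ht)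

lemma step_SumAbove_low (l r : List Int) (M t : Int) (ht : t ≤ M - 1) :
    SumAbove (l ++ (M - 1) :: r) t = SumAbove (l ++ M :: r) t - M := by
  rw [SumAbove_append_cons, SumAbove_append_cons]
  have hd := tri_diff M
  by_cases h1 : t < M - 1
  · rw [if_pos h1, if_pos (by omega : t < M)]
    have hd2 := tri_diff (M - 1)
    omega
  · have ht' : t = M - 1 := by omega
    subst ht'
    rw [if_neg (by omega), if_pos (by omega : M - 1 < M)]
    omega

lemma IsTh_le_max (docks : List Int) (n t M : Int) (hn : 0 ≤ n)
    (hub : ∀ c ∈ docks, c ≤ M) (hth : IsTh docks (n + 1) t) : t ≤ M := by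
  by_contra h
  have := hth.2 M (by omega)
  have := gS_eq_zero docks M hub
  omega

lemma IsTh_step (l r : List Int) (M n t : Int) (hn : 0 ≤ n)
    (hub : ∀ c ∈ l ++ M :: r, c ≤ M)
    (hth : IsTh (l ++ M :: r) (n + 1) t) : IsTh (l ++ (M - 1) :: r) n t := by
  have htM : t ≤ M := IsTh_le_max _ n t M hn hub hth
  constructor
  · by_cases h : t ≤ M - 1
    · rw [step_gS_low l r M t h]; have := hth.1; omega
    · rw [(step_gS_high l r M t (by omega) hub).1]; omega
  · intro s hs
    have hsM : s ≤ M - 1 := by omega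
    rw [step_gS_low l r M s hsM]
    have := hth.2 s hs
    omega

lemma Fm_step (l r : List Int) (M n t : Int) (hn : 0 ≤ n)
    (hub : ∀ c ∈ l ++ M :: r, c ≤ M)
    (hth : IsTh (l ++ M :: r) (n + 1) t) :
    Fm (l ++ M :: r) (n + 1) t = M + Fm (l ++ (M - 1) :: r) n t := by
  have htM : t ≤ M := IsTh_le_max _ n t M hn hub hth
  by_cases h : t ≤ M - 1
  · unfold Fm
    rw [step_SumAbove_low l r M t h, step_gS_low l r M t h]
    ring
  · have htM' : t = M := by omega
    obtain ⟨hz1, hz2⟩ := step_gS_high l r M t (by omega) hub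
    have hub' : ∀ c ∈ l ++ (M - 1) :: r, c ≤ t := by
      intro c hc
      rcases List.mem_append.mp hc with hm | hm
      · have := hub c (by simp [hm]); omega
      · rcases List.mem_cons.mp hm with hm | hm
        · omega
        · have := hub c (by simp [hm]); omega
    have hub2 : ∀ c ∈ l ++ M :: r, c ≤ t := fun c hc => by have := hub c hc; omega
    unfold Fm SumAbove
    rw [filter_above_nil _ t hub2, filter_above_nil _ t hub', hz1, hz2]
    rw [htM']
    ring

-- ---------- part 3: A's max loop realises the extraction process ----------

-- the inner scan on a sorted list extracts the last max of the first k+1 entries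
lemma solveInner_spec (k : Nat) : ∀ (C : List Int), (hk : k < C.length) →
    C.Pairwise (· ≤ ·) →
    ∃ (q : Nat) (hq : q < C.length), q ≤ k ∧ C[q] = C[k] ∧
      (q = 0 ∨ (∀ (h0 : 0 < q), C[q-1]'(by omega) < C[q])) ∧
      solveInner (PySem.List.pyRange (k : Int) (-1) (-1)) C
        = some (C[k], C.set q (C[k] - 1)) := by
  induction k with
  | zero =>
    intro C hk hs
    refine ⟨0, hk, le_refl 0, rfl, Or.inl rfl, ?_⟩
    have hr : PySem.List.pyRange ((0 : Nat) : Int) (-1) (-1) = [(0 : Int)] := by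
      rw [PySem.List.pyRange_neg_one_cons (by omega)]
      rw [PySem.List.pyRange_neg_one_eq_nil (by omega)]
      simp
    rw [hr]
    have hget : PySem.List.pyGet? C 0 = some C[0] := by
      rw [PySem.List.pyGet?_zero, List.getElem?_eq_getElem hk]
    have hset : PySem.List.pySetD C (0 : Int) (C[0] - 1) = C.set 0 (C[0] - 1) := by
      rw [PySem.List.pySetD_of_nonneg C (C[0] - 1) (by omega)]
      rfl
    simp only [solveInner, if_true, hget, hset]
  | succ k ih =>
    intro C hk hs
    have hklen : k < C.length := by omega
    have hcast : ((k + 1 : Nat) : Int) - 1 = (k : Int) := by push_cast; ring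
    have hcons : PySem.List.pyRange ((k + 1 : Nat) : Int) (-1) (-1)
        = ((k + 1 : Nat) : Int) :: PySem.List.pyRange ((k : Nat) : Int) (-1) (-1) := by
      rw [PySem.List.pyRange_neg_one_cons (by omega), hcast]
    rw [hcons]
    have hget1 : PySem.List.pyGet? C ((k + 1 : Nat) : Int) = some C[k + 1] := by
      rw [PySem.List.pyGet?_natCast, List.getElem?_eq_getElem hk]
    have hget2 : PySem.List.pyGet? C ((k : Nat) : Int) = some C[k] := by
      rw [PySem.List.pyGet?_natCast, List.getElem?_eq_getElem hklen]
    simp only [solveInner, if_neg (by omega : ¬ ((k + 1 : Nat) : Int) = 0), hcast,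
      hget1, hget2]
    by_cases hlt : C[k] < C[k + 1]
    · rw [if_pos hlt]
      refine ⟨k + 1, hk, le_refl _, rfl, Or.inr (fun h0 => by simpa using hlt), ?_⟩
      rw [PySem.List.pySetD_natCast]
    · rw [if_neg hlt]
      have hle : C[k] ≤ C[k + 1] := by
        rw [List.pairwise_iff_getElem] at hs
        exact hs k (k + 1) hklen hk (by omega)
      have heq : C[k] = C[k + 1] := by omega
      obtain ⟨q, hq, hqk, hqv, hdec, hrun⟩ := ih C hklen hs
      refine ⟨q, hq, by omega, by rw [hqv, heq], hdec, ?_⟩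
      rw [hrun, ← heq]

lemma set_pairwise (C : List Int) (q : Nat) (hq : q < C.length)
    (hs : C.Pairwise (· ≤ ·))
    (hdec : q = 0 ∨ (∀ (h0 : 0 < q), C[q-1]'(by omega) < C[q])) :
    (C.set q (C[q] - 1)).Pairwise (· ≤ ·) := by
  rw [List.pairwise_iff_getElem] at hs ⊢
  intro i j hi hj hij
  have hi' : i < C.length := by simpa using hi
  have hj' : j < C.length := by simpa using hj
  simp only [List.getElem_set]
  by_cases h1 : q = i
  · subst h1
    by_cases h2 : q = j
    · omega
    · simp only [if_neg h2]
      have := hs q j hi' hj' hij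
      omega
  · by_cases h2 : q = j
    · subst h2
      simp only [if_neg h1]
      rcases hdec with hd | hd
      · omega
      · have hlt := hd (by omega)
        by_cases hiq : i = q - 1
        · subst hiq; omega
        · have := hs i (q - 1) hi' (by omega) (by omega)
          omega
    · simp only [if_neg h1, if_neg h2]
      exact hs i j hi' hj' hij

-- the outer loop computes the closed form
lemma solveOuter_spec (Bn : Nat) (hB : 0 < Bn) : ∀ (n : Nat) (C : List Int) (ma t : Int),
    Bn ≤ C.length → C.Pairwise (· ≤ ·) → IsTh (C.take Bn) (n : Int) t →
    ∃ C', solveOuter (Bn : Int) n ma C = some (ma + Fm (C.take Bn) (n : Int) t, C') := by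
  intro n
  induction n with
  | zero =>
    intro C ma t hlen hs hth
    refine ⟨C, ?_⟩
    have h0 : gS (C.take Bn) t ≤ 0 := by simpa using hth.1
    rw [Nat.cast_zero, Fm_zero (C.take Bn) t h0]
    simp [solveOuter]
  | succ n ih =>
    intro C ma t hlen hs hth
    have hk : Bn - 1 < C.length := by omega
    have hble : ((Bn : Int) - 1) = ((Bn - 1 : Nat) : Int) := by push_cast; omega
    obtain ⟨q, hq, hqk, hqv, hdec, hrun⟩ := solveInner_spec (Bn - 1) C hk hs
    set M := C[Bn - 1]'hk with hM
    set docks := C.take Bn with hdks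
    have hdlen : docks.length = Bn := by simp [hdks]; omega
    have hqd : q < docks.length := by omega
    have hdq : docks[q] = M := by
      simp only [hdks, List.getElem_take]; exact hqv
    -- decomposition of the docks around the extracted maximum
    set dt := docks.take q with hdt
    set dd := docks.drop (q + 1) with hdd
    have hdecomp : docks = dt ++ M :: dd := by
      rw [hdt, hdd, ← hdq, List.getElem_cons_drop hqd, List.take_append_drop]
    have hdecomp2 : docks.set q (M - 1) = dt ++ (M - 1) :: dd :=
      List.set_eq_take_cons_drop (M - 1) hqd
    -- M bounds every dock
    have hub : ∀ c ∈ docks, c ≤ M := by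
      intro c hc
      obtain ⟨i, hi, hci⟩ := List.mem_iff_getElem.mp hc
      have hiBn : i < Bn := by omega
      have hgi : docks[i] = C[i]'(by omega) := by simp only [hdks, List.getElem_take]
      rcases Nat.lt_or_ge i (Bn - 1) with hlt | hge
      · have := (List.pairwise_iff_getElem.mp hs) i (Bn - 1) (by omega) hk hlt
        omega
      · have : i = Bn - 1 := by omega
        subst this
        omega
    -- one step of the loop
    have hC2len : (C.set q (M - 1)).length = C.length := by simp
    have hC2sorted : (C.set q (M - 1)).Pairwise (· ≤ ·) := by
      have h := set_pairwise C q hq hs hdec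
      rwa [hqv] at h
    have hC2take : (C.set q (M - 1)).take Bn = dt ++ (M - 1) :: dd := by
      rw [List.take_set, ← hdks, hdecomp2]
    have hthC : IsTh (dt ++ M :: dd) ((n : Int) + 1) t := by
      rw [← hdecomp]
      have : ((n + 1 : Nat) : Int) = (n : Int) + 1 := by push_cast; ring
      rwa [this] at hth
    have hub' : ∀ c ∈ dt ++ M :: dd, c ≤ M := by rw [← hdecomp]; exact hub
    have hth2 : IsTh ((C.set q (M - 1)).take Bn) (n : Int) t := by
      rw [hC2take]
      exact IsTh_step dt dd M (n : Int) t (by omega) hub' hthC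
    obtain ⟨C', hC'⟩ := ih (C.set q (M - 1)) (ma + M) t (by omega) hC2sorted hth2
    refine ⟨C', ?_⟩
    simp only [solveOuter, hble, hrun]
    rw [hC']
    have hstep : Fm (dt ++ M :: dd) ((n : Int) + 1) t = M + Fm (dt ++ (M - 1) :: dd) (n : Int) t :=
      Fm_step dt dd M (n : Int) t (by omega) hub' hthC
    rw [← hdecomp] at hstep
    have hcast : ((n + 1 : Nat) : Int) = (n : Int) + 1 := by push_cast; ring
    rw [hC2take, hcast, hstep]
    simp only [Option.some.injEq, Prod.mk.injEq]
    exact ⟨by ring, trivial⟩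

-- B ≤ 0 : the inner range is empty and the outer loop only spins
lemma solveOuter_nonpos (B : Int) (hB : B ≤ 0) : ∀ (n : Nat) (ma : Int) (C : List Int),
    solveOuter B n ma C = some (ma, C) := by
  intro n
  induction n with
  | zero => intro ma C; rfl
  | succ m ih =>
    intro ma C
    have he : PySem.List.pyRange (B - 1) (-1) (-1) = [] :=
      PySem.List.pyRange_neg_one_eq_nil (by omega)
    simp [solveOuter, he, solveInner, ih]

-- the three top-level cases of both programs agree
lemma main_eq (A : Int) (B : Int) (C : List Int) (hpre : Pre_solve A B C) :
    solve A B C = solve_alt A B C := by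
  unfold Pre_solve at hpre
  unfold solve solve_alt
  simp only []
  set Cs := PySem.List.sorted C (fun x => x) false with hCs
  have hmi := altMi_eq_solveMin A Cs
  by_cases hA : 0 < A
  · by_cases hB : 0 < B
    · -- the interesting case: the loop really extracts maxima
      have hlenC : Cs.length = C.length := PySem.List.length_sorted C (fun x => x) false
      have hlen : B ≤ (Cs.length : Int) := by rw [hlenC]; exact hpre hA
      set Bn := B.toNat with hBn
      have hBI : (Bn : Int) = B := Int.toNat_of_nonneg (by omega)
      have hBnpos : 0 < Bn := by omega
      have hBnlen : Bn ≤ Cs.length := by omega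
      have hs : Cs.Pairwise (· ≤ ·) := by
        simpa using PySem.List.sorted_pairwise C (fun x => x)
      have hdocks : PySem.List.slice Cs none (some B) = Cs.take Bn := by
        rw [PySem.List.slice_to Cs (by omega)]
      set docks := Cs.take Bn with hdks
      have hdlen : docks.length = Bn := by simp [hdks]; omega
      have hdne : docks ≠ [] := by
        intro h; rw [h] at hdlen; simp at hdlen; omega
      obtain ⟨mn, hmn⟩ : ∃ mn, PySem.List.min? docks (fun x => x) = some mn := by
        cases h : PySem.List.min? docks (fun x => x) with
        | none => exact absurd ((PySem.List.min?_eq_none_iff docks _).mp h) hdne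
        | some m => exact ⟨m, rfl⟩
      obtain ⟨mx, hmx⟩ : ∃ mx, PySem.List.max? docks (fun x => x) = some mx := by
        cases h : PySem.List.max? docks (fun x => x) with
        | none => exact absurd ((PySem.List.max?_eq_none_iff docks _).mp h) hdne
        | some m => exact ⟨m, rfl⟩
      have hmnmem : mn ∈ docks := PySem.List.min?_mem hmn
      have hmnmx : mn ≤ mx := PySem.List.max?_isMax hmx mn hmnmem
      have hub : ∀ c ∈ docks, c ≤ mx := fun c hc => PySem.List.max?_isMax hmx c hc
      set lo := mn - A - 1 with hlo
      set t := altSearch docks A (mx - lo).toNat lo mx with ht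
      have hth : IsTh docks A t := by
        refine altSearch_spec docks A (mx - lo).toNat lo mx (le_refl _) (by omega) ?_ ?_
        · rw [gS_eq_zero docks mx hub]; omega
        · intro s hsl
          have h1 := gS_le_of_mem docks hmnmem s
          omega
      have hcastA : ((A.toNat : Nat) : Int) = A := Int.toNat_of_nonneg (by omega)
      have hth' : IsTh docks ((A.toNat : Nat) : Int) t := by rwa [hcastA]
      obtain ⟨C', hC'⟩ := solveOuter_spec Bn hBnpos A.toNat Cs 0 t hBnlen hs hth'
      rw [hBI] at hC'
      rw [hC']
      rw [if_pos ⟨hA, hB, by intro h; rw [h] at hlenC; simp at hlenC; omega⟩]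
      rw [hdocks, hmn, hmx]
      simp only [← hdks, ← hlo, ← ht, zero_add, hcastA, hmi]
      unfold Fm SumAbove
      rw [altG_eq_gS]
    · -- B ≤ 0 : the scan range is empty, no ship ever docks
      rw [solveOuter_nonpos B (by omega) A.toNat 0 Cs]
      rw [if_neg (by intro h; exact hB h.2.1)]
      rw [hmi]
  · -- A ≤ 0 : the outer loop does not run
    have h0 : A.toNat = 0 := by omega
    rw [h0]
    rw [if_neg (by intro h; exact hA h.1)]
    rw [hmi]
    rfl

-- ===== VERDICT (by name: the statement is the Claim_ definition above) =====
theorem solve_spec : Claim_equal_solve := by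
  intro A B C _ hpre
  unfold Spec_solve
  exact main_eq A B C hpre
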